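-- pv_equiv track=rewrite | github.com/pypi-data/pypi-mirror-2 | packages/segtools/segtools-1.0.0-py2.5.egg/segtools/feature_aggregation.py | get_transcript_length
-- ===== SOURCE A (Python) =====
-- EXON_COMPONENT = "exon"
--
-- def get_transcript_length(entries):
--     """Returns the length of the transcript.
--
--     Assumes entries are all for the same transcript
--
--     :param entries: each entry is (chrom, start, end, strand, component, source)
--                     and all entries should correspond to the same gene_id
--     :type entries: list of 6-tuples
--     :rtype: integer or None
--
--     """
--     min_start = None
--     max_end = None
--     for entry in entries:
--         (chrom, start, end, strand, component, source) = entry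
--         if component == EXON_COMPONENT:
--             if min_start is None or start < min_start:
--                 min_start = start
--             if max_end is None or end > max_end:
--                 max_end = end
--
--     if min_start is None or max_end is None:
--         return None
--     else:
--         return max_end - min_start
-- ===== SOURCE B (Python) =====
-- EXON_COMPONENT = "exon"
--
-- def get_transcript_length(entries):
--     starts = sorted(e[1] for e in entries if e[4] == EXON_COMPONENT)
--     if not starts:
--         return None
--     ends = sorted((e[2] for e in entries if e[4] == EXON_COMPONENT), reverse=True)
--     return ends[0] - starts[0]
-- ===== Notes on version B (the rewrite author's own statement) =====
-- stated objective: alternative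
-- what changed: Replaces A's single interleaved running min/max accumulator loop by sorting the exon start positions ascending and the exon end positions descending and taking the heads of the two sorted lists.
import Mathlib
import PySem

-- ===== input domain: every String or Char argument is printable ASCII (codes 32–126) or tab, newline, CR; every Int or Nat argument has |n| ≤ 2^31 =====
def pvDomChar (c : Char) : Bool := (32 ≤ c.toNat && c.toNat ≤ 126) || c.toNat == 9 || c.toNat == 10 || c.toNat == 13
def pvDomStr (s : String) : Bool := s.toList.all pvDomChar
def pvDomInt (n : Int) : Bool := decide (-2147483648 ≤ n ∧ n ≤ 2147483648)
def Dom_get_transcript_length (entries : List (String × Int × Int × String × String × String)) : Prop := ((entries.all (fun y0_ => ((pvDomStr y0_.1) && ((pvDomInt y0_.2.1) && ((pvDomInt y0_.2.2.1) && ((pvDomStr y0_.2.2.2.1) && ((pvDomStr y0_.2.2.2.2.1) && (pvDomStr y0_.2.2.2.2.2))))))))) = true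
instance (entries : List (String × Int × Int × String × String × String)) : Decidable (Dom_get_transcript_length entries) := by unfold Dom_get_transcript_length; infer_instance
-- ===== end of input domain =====

-- B replaces A's single interleaved running min/max accumulator loop by sorting exon
-- starts ascending and exon ends descending and taking the two heads (objective: alternative).

def EXON_COMPONENT : String := "exon"

-- ===== PORT A =====
-- the body of A's for-loop: update the (min_start, max_end) state with one entry
def pvStepA (st : Option Int × Option Int)
    (e : String × Int × Int × String × String × String) :
    Option Int × Option Int :=
  let (_, start, end_, _, component, _) := e
  if component == EXON_COMPONENT then
    let mn := match st.1 with
      | none => some start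
      | some m => if start < m then some start else some m
    let mx := match st.2 with
      | none => some end_
      | some M => if end_ > M then some end_ else some M
    (mn, mx)
  else st

def get_transcript_length (entries : List (String × Int × Int × String × String × String)) : Option Int :=
  let st := entries.foldl pvStepA (none, none)
  match st.1, st.2 with
  | some m, some M => some (M - m)
  | _, _ => none

-- ===== PORT B =====
def get_transcript_length_alt (entries : List (String × Int × Int × String × String × String)) : Option Int :=
  let starts := PySem.List.sorted
    ((entries.filter (fun e => e.2.2.2.2.1 == EXON_COMPONENT)).map (fun e => e.2.1))
    (fun x => x) false
  match starts with
  | [] => none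
  | s0 :: _ =>
    let ends := PySem.List.sorted
      ((entries.filter (fun e => e.2.2.2.2.1 == EXON_COMPONENT)).map (fun e => e.2.2.1))
      (fun x => x) true
    match ends with
    | [] => none   -- unreachable: ends has the same length as starts
    | e0 :: _ => some (e0 - s0)

-- ===== PRECONDITION & SPEC =====
def Spec_get_transcript_length (entries : List (String × Int × Int × String × String × String)) (out : Option Int) : Prop := out = get_transcript_length_alt entries
instance (entries : List (String × Int × Int × String × String × String)) (out : Option Int) : Decidable (Spec_get_transcript_length entries out) := by unfold Spec_get_transcript_length; infer_instance

-- ===== CLAIM (what is proved, stated in full; the proofs are below) =====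
def Claim_equal_get_transcript_length : Prop := ∀ (entries : List (String × Int × Int × String × String × String)), Dom_get_transcript_length entries → Spec_get_transcript_length entries (get_transcript_length entries)

-- ===== LEMMAS AND PROOFS =====

-- once the state is (some m, some M), A's fold computes the running min/max over exon entries
theorem pvFold_some (entries : List (String × Int × Int × String × String × String))
    (m M : Int) :
    entries.foldl pvStepA (some m, some M)
      = (some ((entries.filter (fun e => e.2.2.2.2.1 == EXON_COMPONENT)).foldl
                  (fun a x => min a x.2.1) m),
         some ((entries.filter (fun e => e.2.2.2.2.1 == EXON_COMPONENT)).foldl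
                  (fun a x => max a x.2.2.1) M)) := by
  induction entries generalizing m M with
  | nil => simp
  | cons e rest ih =>
    obtain ⟨c, s, en, st, comp, src⟩ := e
    by_cases h : comp == EXON_COMPONENT
    · have e1 : (if s < m then some s else some m) = some (min m s) := by
        split_ifs with h' <;> simp [min_def] <;> omega
      have e2 : (if en > M then some en else some M) = some (max M en) := by
        split_ifs with h' <;> simp [max_def] <;> omega
      simp only [List.foldl_cons, List.filter_cons, pvStepA, h, if_pos, e1, e2]
      simp [ih]
    · simp only [List.foldl_cons, List.filter_cons, pvStepA]
      simp [h, ih]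

-- from the initial (none, none) state, A's fold dispatches on the first exon entry
theorem pvFold_none (entries : List (String × Int × Int × String × String × String)) :
    entries.foldl pvStepA (none, none)
      = (match entries.filter (fun e => e.2.2.2.2.1 == EXON_COMPONENT) with
         | [] => (none, none)
         | e :: rest => (some (rest.foldl (fun a x => min a x.2.1) e.2.1),
                         some (rest.foldl (fun a x => max a x.2.2.1) e.2.2.1))) := by
  induction entries with
  | nil => simp
  | cons e rest ih =>
    obtain ⟨c, s, en, st, comp, src⟩ := e
    by_cases h : comp == EXON_COMPONENT
    · simp only [List.foldl_cons, List.filter_cons, pvStepA, h, if_pos]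
      rw [pvFold_some]
    · simp only [List.foldl_cons, List.filter_cons, pvStepA]
      simp [h, ih]

theorem pvFoldMin_le (l : List Int) (a : Int) : ∀ x ∈ a :: l, l.foldl min a ≤ x := by
  induction l generalizing a with
  | nil => intro x hx; simp at hx; simp [hx]
  | cons b t ih =>
    intro x hx
    simp only [List.foldl_cons]
    have hini : t.foldl min (min a b) ≤ min a b := ih (min a b) (min a b) (by simp)
    rcases List.mem_cons.mp hx with rfl | hx
    · exact le_trans hini (min_le_left _ _)
    · rcases List.mem_cons.mp hx with rfl | hx
      · exact le_trans hini (min_le_right _ _)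
      · exact ih (min a b) x (by simp [hx])

theorem pvFoldMin_mem (l : List Int) (a : Int) : l.foldl min a ∈ a :: l := by
  induction l generalizing a with
  | nil => simp
  | cons b t ih =>
    simp only [List.foldl_cons]
    have := ih (min a b)
    rcases List.mem_cons.mp this with h | h
    · rw [h]; rcases le_total a b with hab | hab
      · simp [min_eq_left hab]
      · simp [min_eq_right hab]
    · simp [h]

theorem pvFoldMax_le (l : List Int) (a : Int) : ∀ x ∈ a :: l, x ≤ l.foldl max a := by
  induction l generalizing a with
  | nil => intro x hx; simp at hx; simp [hx]
  | cons b t ih =>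
    intro x hx
    simp only [List.foldl_cons]
    have hini : max a b ≤ t.foldl max (max a b) := ih (max a b) (max a b) (by simp)
    rcases List.mem_cons.mp hx with rfl | hx
    · exact le_trans (le_max_left _ _) hini
    · rcases List.mem_cons.mp hx with rfl | hx
      · exact le_trans (le_max_right _ _) hini
      · exact ih (max a b) x (by simp [hx])

theorem pvFoldMax_mem (l : List Int) (a : Int) : l.foldl max a ∈ a :: l := by
  induction l generalizing a with
  | nil => simp
  | cons b t ih =>
    simp only [List.foldl_cons]
    have := ih (max a b)
    rcases List.mem_cons.mp this with h | h
    · rw [h]; rcases le_total a b with hab | hab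
      · simp [max_eq_right hab]
      · simp [max_eq_left hab]
    · simp [h]

-- the head of the ascending sort of a :: l is the fold-min of a :: l
theorem pvSortedHead_min (l : List Int) (a s0 : Int) (t : List Int)
    (h : PySem.List.sorted (a :: l) (fun x => x) false = s0 :: t) :
    s0 = l.foldl min a := by
  have hmem : s0 ∈ a :: l := by
    have : s0 ∈ PySem.List.sorted (a :: l) (fun x => x) false := by simp [h]
    exact (PySem.List.mem_sorted _ _ _ _).mp this
  have hle : ∀ y ∈ a :: l, s0 ≤ y := by
    intro y hy
    exact PySem.List.key_head_sorted_le (xs := a :: l) (key := fun x => x) h y hy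
  exact le_antisymm (hle _ (pvFoldMin_mem l a)) (pvFoldMin_le l a s0 hmem)

-- the head of the descending sort of a :: l is the fold-max of a :: l
theorem pvSortedHead_max (l : List Int) (a e0 : Int) (t : List Int)
    (h : PySem.List.sorted (a :: l) (fun x => x) true = e0 :: t) :
    e0 = l.foldl max a := by
  have hmem : e0 ∈ a :: l := by
    have : e0 ∈ PySem.List.sorted (a :: l) (fun x => x) true := by simp [h]
    exact (PySem.List.mem_sorted _ _ _ _).mp this
  have hge : ∀ y ∈ a :: l, y ≤ e0 := by
    intro y hy
    exact PySem.List.key_head_sorted_rev_ge (xs := a :: l) (key := fun x => x) h y hy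
  exact le_antisymm (pvFoldMax_le l a e0 hmem) (hge _ (pvFoldMax_mem l a))

-- ===== VERDICT (by name: the statement is the Claim_ definition above) =====
theorem get_transcript_length_spec : Claim_equal_get_transcript_length := by
  intro entries _
  unfold Spec_get_transcript_length get_transcript_length get_transcript_length_alt
  rw [pvFold_none]
  cases hf : entries.filter (fun e => e.2.2.2.2.1 == EXON_COMPONENT) with
  | nil =>
    have h1 : PySem.List.sorted ([] : List Int) (fun x => x) false = [] :=
      (PySem.List.sorted_eq_nil_iff _ _ _).mpr rfl
    simp [h1]
  | cons e rest =>
    simp only [List.map_cons]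
    cases hs : PySem.List.sorted (e.2.1 :: rest.map (fun e => e.2.1)) (fun x => x) false with
    | nil => exact absurd hs (by simp [PySem.List.sorted_eq_nil_iff])
    | cons s0 ts =>
      cases he : PySem.List.sorted (e.2.2.1 :: rest.map (fun e => e.2.2.1)) (fun x => x) true with
      | nil =>
        exact absurd he (by simp [PySem.List.sorted_eq_nil_iff])
      | cons e0 te =>
        have h1 : s0 = (rest.map (fun e => e.2.1)).foldl min e.2.1 :=
          pvSortedHead_min _ _ _ _ hs
        have h2 : e0 = (rest.map (fun e => e.2.2.1)).foldl max e.2.2.1 :=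
          pvSortedHead_max _ _ _ _ he
        simp only [List.foldl_map] at h1 h2
        simp [h1, h2]
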